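-- pv_equiv track=rewrite | github.com/heartsh/consprob-trained | src/compile_rna_fams_2.py | recover_ss
-- ===== SOURCE A (Python) =====
-- bracket_pairs = [("(", ")"), ("A", "a"), ("B", "b"), ("C", "c"), ("D", "d"), ("E", "e"), ]
--
-- def recover_ss(css, seq_with_gaps):
--   pos_map = {}
--   pos = 0
--   for (i, char) in enumerate(seq_with_gaps):
--     if char != "-":
--       pos_map[i] = pos
--       pos += 1
--   recovered_ss = "." * pos
--   stack = []
--   for (left, right) in bracket_pairs:
--     for (i, char) in enumerate(css):
--       if char == left:
--         stack.append(i)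
--       elif char == right:
--         j = stack.pop()
--         if seq_with_gaps[j] == "-" or seq_with_gaps[i] == "-":
--           continue
--         mapped_j = pos_map[j]
--         mapped_i = pos_map[i]
--         recovered_ss = recovered_ss[: mapped_j] + left + recovered_ss[mapped_j + 1 :]
--         recovered_ss = recovered_ss[: mapped_i] + right + recovered_ss[mapped_i + 1 :]
--   return recovered_ss
-- ===== SOURCE B (Python) =====
-- bracket_pairs = [("(", ")"), ("A", "a"), ("B", "b"), ("C", "c"), ("D", "d"), ("E", "e"), ]
--
-- def recover_ss(css, seq_with_gaps):
--   pos_map = {}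
--   pos = 0
--   for (i, char) in enumerate(seq_with_gaps):
--     if char != "-":
--       pos_map[i] = pos
--       pos += 1
--   left_of = {right: left for (left, right) in bracket_pairs}
--   stacks = {left: [] for (left, right) in bracket_pairs}
--   out = ["."] * pos
--   for (i, char) in enumerate(css):
--     if char in stacks:
--       stacks[char].append(i)
--     elif char in left_of:
--       left = left_of[char]
--       j = stacks[left].pop()
--       if seq_with_gaps[j] == "-" or seq_with_gaps[i] == "-":
--         continue
--       out[pos_map[j]] = left
--       out[pos_map[i]] = char
--   return "".join(out)
-- ===== Notes on version B (the rewrite author's own statement) =====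
-- stated objective: alternative
-- what changed: A makes six passes over css (one per bracket type) with a shared carried stack and rebuilds the whole string by slicing for every write; B makes one pass with a dict of per-type stacks and a right-to-left bracket map, writing into a mutable char list joined at the end.
-- outside the precondition, e.g. on recover_ss('(a', 'GG'): A returns 'Aa', B raises IndexError
import Mathlib
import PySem

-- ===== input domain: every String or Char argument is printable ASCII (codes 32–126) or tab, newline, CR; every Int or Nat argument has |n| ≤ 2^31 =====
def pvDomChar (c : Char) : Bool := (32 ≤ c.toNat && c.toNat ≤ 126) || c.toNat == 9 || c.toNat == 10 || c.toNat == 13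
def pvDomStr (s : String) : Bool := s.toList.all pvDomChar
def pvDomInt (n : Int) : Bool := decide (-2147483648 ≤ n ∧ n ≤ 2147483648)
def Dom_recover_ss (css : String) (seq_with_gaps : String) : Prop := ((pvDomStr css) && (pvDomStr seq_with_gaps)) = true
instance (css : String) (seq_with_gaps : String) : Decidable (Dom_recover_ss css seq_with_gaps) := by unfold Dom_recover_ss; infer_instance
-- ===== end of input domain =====

-- B replaces A's six passes over css (with string re-splicing per write) by a single pass
-- with per-bracket-type stacks writing into a mutable char list joined at the end.

-- ===== PORT A =====
-- module constant bracket_pairs (shared by both Pythons)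
def pvPairs : List (Char × Char) :=
  [('(', ')'), ('A', 'a'), ('B', 'b'), ('C', 'c'), ('D', 'd'), ('E', 'e')]

-- the pos_map-building loop (textually identical in A and in B; shared helper)
def pvPosMap (seq : List Char) : PySem.Dict Int Int × Int :=
  (PySem.List.enumerate seq 0).foldl
    (fun st p => if p.2 ≠ '-' then (st.1.insert p.1 st.2, st.2 + 1) else st)
    (PySem.Dict.empty, 0)

-- body of A's inner loop, state = (stack, recovered_ss)
def pvStepA (seq : List Char) (pm : PySem.Dict Int Int) (lr : Char × Char)
    (st : List Int × List Char) (p : Int × Char) : List Int × List Char :=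
  if p.2 = lr.1 then (st.1 ++ [p.1], st.2)
  else if p.2 = lr.2 then
    match PySem.List.pop? st.1 (-1) with
    | none => st  -- Python raises IndexError here (excluded by Pre_)
    | some (j, rest) =>
      match PySem.List.pyGet? seq j, PySem.List.pyGet? seq p.1 with
      | some cj, some ci =>
        if cj = '-' ∨ ci = '-' then (rest, st.2)
        else
          match pm.get? j, pm.get? p.1 with
          | some mj, some mi =>
            let r1 := PySem.List.slice st.2 none (some mj) ++ [lr.1] ++
                      PySem.List.slice st.2 (some (mj + 1)) none
            let r2 := PySem.List.slice r1 none (some mi) ++ [lr.2] ++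
                      PySem.List.slice r1 (some (mi + 1)) none
            (rest, r2)
          | _, _ => (rest, st.2)  -- Python raises KeyError (pos_map holds every non-gap index: unreachable)
      | _, _ => (rest, st.2)  -- Python raises IndexError (excluded by Pre_)
  else st

def recover_ss (css : String) (seq_with_gaps : String) : String :=
  let pm := pvPosMap seq_with_gaps.toList
  let base := PySem.List.pyRepeat ['.'] pm.2   -- "." * pos
  let res := pvPairs.foldl
    (fun st lr => (PySem.List.enumerate css.toList 0).foldl
        (pvStepA seq_with_gaps.toList pm.1 lr) st)
    (([] : List Int), base)
  String.ofList res.2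

-- ===== PORT B =====
-- left_of = {right: left for (left, right) in bracket_pairs}
def pvLeftOf : PySem.Dict Char Char :=
  pvPairs.foldl (fun d lr => d.insert lr.2 lr.1) PySem.Dict.empty

-- stacks = {left: [] for (left, right) in bracket_pairs}
def pvStacks0 : PySem.Dict Char (List Int) :=
  pvPairs.foldl (fun d lr => d.insert lr.1 []) PySem.Dict.empty

-- body of B's single loop, state = (stacks, out)
def pvStepB (seq : List Char) (pm : PySem.Dict Int Int)
    (st : PySem.Dict Char (List Int) × List Char) (p : Int × Char) :
    PySem.Dict Char (List Int) × List Char :=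
  if st.1.contains p.2 then
    (st.1.insert p.2 (((st.1.get? p.2).getD []) ++ [p.1]), st.2)  -- stacks[char].append(i)
  else if pvLeftOf.contains p.2 then
    let l := (pvLeftOf.get? p.2).getD ' '   -- left = left_of[char] (key present)
    match PySem.List.pop? ((st.1.get? l).getD []) (-1) with
    | none => st  -- Python raises IndexError here (excluded by Pre_)
    | some (j, rest) =>
      let st1 := st.1.insert l rest   -- stacks[left] after .pop()
      match PySem.List.pyGet? seq j, PySem.List.pyGet? seq p.1 with
      | some cj, some ci =>
        if cj = '-' ∨ ci = '-' then (st1, st.2)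
        else
          match pm.get? j, pm.get? p.1 with
          | some mj, some mi =>
            -- out[pos_map[j]] = left; out[pos_map[i]] = char
            -- (pySetD is exact here: pos_map values are always 0 ≤ v < len(out))
            (st1, PySem.List.pySetD (PySem.List.pySetD st.2 mj l) mi p.2)
          | _, _ => (st1, st.2)  -- Python KeyError (unreachable, as in A)
      | _, _ => (st1, st.2)  -- Python raises IndexError (excluded by Pre_)
  else st

def recover_ss_alt (css : String) (seq_with_gaps : String) : String :=
  let pm := pvPosMap seq_with_gaps.toList
  let base := PySem.List.pyRepeat ['.'] pm.2   -- ["."] * pos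
  let res := (PySem.List.enumerate css.toList 0).foldl
    (pvStepB seq_with_gaps.toList pm.1) (pvStacks0, base)
  String.ofList res.2   -- "".join(out)

-- ===== PRECONDITION & SPEC =====
-- Pre_ excludes the inputs where A raises (a right bracket popping an empty stack, or a matched
-- right bracket at an index beyond len(seq_with_gaps)) and the inputs where a right bracket is
-- matched, across A's carried stack, with a leftover left bracket of a DIFFERENT type from an
-- earlier pass — an accident of A's shared stack on malformed css, on which B raises.
def Pre_recover_ss (css : String) (seq_with_gaps : String) : Prop :=
  (∀ lr ∈ [('(', ')'), ('A', 'a'), ('B', 'b'), ('C', 'c'), ('D', 'd'), ('E', 'e')],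
     ∀ k, k ≤ css.toList.length →
       (css.toList.take k).count lr.2 ≤ (css.toList.take k).count lr.1)
  ∧ (∀ k, k < css.toList.length →
       css.toList.getD k ' ' ∈ [')', 'a', 'b', 'c', 'd', 'e'] →
       k < seq_with_gaps.toList.length)

instance (css : String) (seq_with_gaps : String) : Decidable (Pre_recover_ss css seq_with_gaps) := by
  unfold Pre_recover_ss; infer_instance

def pvWitness_recover_ss : String × String := ("(.)", "A-CG")

def Spec_recover_ss (css : String) (seq_with_gaps : String) (out : String) : Prop :=
  out = recover_ss_alt css seq_with_gaps
instance (css : String) (seq_with_gaps : String) (out : String) :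
    Decidable (Spec_recover_ss css seq_with_gaps out) := by unfold Spec_recover_ss; infer_instance

-- ===== CLAIM (what is proved, stated in full; the proofs are below) =====
def Claim_equal_recover_ss : Prop := ∀ (css : String) (seq_with_gaps : String),
  Dom_recover_ss css seq_with_gaps → Pre_recover_ss css seq_with_gaps →
  Spec_recover_ss css seq_with_gaps (recover_ss css seq_with_gaps)

-- ===== LEMMAS AND PROOFS =====

-- events: one matched bracket pair (left char, right char, left index, right index)
abbrev PvEv := Char × Char × Int × Int

def pvLefts : List Char := ['(', 'A', 'B', 'C', 'D', 'E']

def pvIsLeft (c : Char) : Bool := c ∈ pvLefts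

-- left_of as a plain function
def pvLOf (c : Char) : Option Char :=
  if c = ')' then some '(' else if c = 'a' then some 'A' else if c = 'b' then some 'B'
  else if c = 'c' then some 'C' else if c = 'd' then some 'D' else if c = 'e' then some 'E'
  else none

def pvPush (σ : Char → List Int) (c : Char) (i : Int) : Char → List Int :=
  fun x => if x = c then i :: σ x else σ x

def pvPop (σ : Char → List Int) (c : Char) : Char → List Int :=
  fun x => if x = c then (σ x).tail else σ x

-- the matched events of B's single pass (σ: per-type stacks, head = top)
def pvRun (σ : Char → List Int) : List (Int × Char) → List PvEv
  | [] => []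
  | p :: ps =>
    if pvIsLeft p.2 then pvRun (pvPush σ p.2 p.1) ps
    else
      match pvLOf p.2 with
      | some l =>
        match σ l with
        | j :: _ => (l, p.2, j, p.1) :: pvRun (pvPop σ l) ps
        | [] => pvRun σ ps
      | none => pvRun σ ps

-- every pop succeeds
def pvOk (σ : Char → List Int) : List (Int × Char) → Prop
  | [] => True
  | p :: ps =>
    if pvIsLeft p.2 then pvOk (pvPush σ p.2 p.1) ps
    else
      match pvLOf p.2 with
      | some l => σ l ≠ [] ∧ pvOk (pvPop σ l) ps
      | none => pvOk σ ps

-- single-type versions (A's pass for one pair)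
def pvRun1 (l r : Char) (s : List Int) : List (Int × Char) → List PvEv
  | [] => []
  | p :: ps =>
    if p.2 = l then pvRun1 l r (p.1 :: s) ps
    else if p.2 = r then
      match s with
      | j :: t => (l, r, j, p.1) :: pvRun1 l r t ps
      | [] => pvRun1 l r s ps
    else pvRun1 l r s ps

def pvFin1 (l r : Char) (s : List Int) : List (Int × Char) → List Int
  | [] => s
  | p :: ps =>
    if p.2 = l then pvFin1 l r (p.1 :: s) ps
    else if p.2 = r then
      match s with
      | _ :: t => pvFin1 l r t ps
      | [] => pvFin1 l r s ps
    else pvFin1 l r s ps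

def pvOk1 (l r : Char) (h : Nat) : List (Int × Char) → Prop
  | [] => True
  | p :: ps =>
    if p.2 = l then pvOk1 l r (h + 1) ps
    else if p.2 = r then 0 < h ∧ pvOk1 l r (h - 1) ps
    else pvOk1 l r h ps

-- applying one matched event to the output list
def pvApply (seq : List Char) (pm : PySem.Dict Int Int) (out : List Char) (e : PvEv) : List Char :=
  match PySem.List.pyGet? seq e.2.2.1, PySem.List.pyGet? seq e.2.2.2 with
  | some cj, some ci =>
    if cj = '-' ∨ ci = '-' then out
    else
      match pm.get? e.2.2.1, pm.get? e.2.2.2 with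
      | some mj, some mi => PySem.List.pySetD (PySem.List.pySetD out mj e.1) mi e.2.1
      | _, _ => out
  | _, _ => out

def pvPosAt (seq : List Char) (k : Nat) : Nat := (seq.take k).countP (fun c => c ≠ '-')

def pvBag (σ : Char → List Int) : List Int := pvLefts.flatMap σ

def pvIdx (e : PvEv) : List Int := [e.2.2.1, e.2.2.2]

-- ---- small char-table facts -------------------------------------------------
theorem pv_left_isLeft : ∀ lr ∈ pvPairs, pvIsLeft lr.1 = true := by decide
theorem pv_right_notLeft : ∀ lr ∈ pvPairs, pvIsLeft lr.2 = false := by decide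
theorem pv_lOf_right : ∀ lr ∈ pvPairs, pvLOf lr.2 = some lr.1 := by decide
theorem pv_lefts_nodup : pvLefts.Nodup := by decide

theorem pv_lOf_mem {c l : Char} (h : pvLOf c = some l) : (l, c) ∈ pvPairs := by
  unfold pvLOf at h
  split_ifs at h <;> simp_all [pvPairs] <;> exact h.symm

theorem pv_isLeft_of_lOf {c l : Char} (h : pvLOf c = some l) :
    pvIsLeft c = false ∧ pvIsLeft l = true := by
  have hm := pv_lOf_mem h
  exact ⟨pv_right_notLeft _ hm, pv_left_isLeft _ hm⟩

theorem pv_rights_det : ∀ lr ∈ pvPairs, ∀ lr' ∈ pvPairs, lr.2 = lr'.2 → lr.1 = lr'.1 := by decide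

theorem pv_lefts_det : ∀ lr ∈ pvPairs, ∀ lr' ∈ pvPairs, lr.1 = lr'.1 → lr.2 = lr'.2 := by decide

-- ---- pos_map characterization ----------------------------------------------

theorem pvPosAt_zero (seq : List Char) : pvPosAt seq 0 = 0 := by simp [pvPosAt]

theorem pvPosAt_cons (x : Char) (xs : List Char) (n : Nat) :
    pvPosAt (x :: xs) (n + 1) = (if x = '-' then 0 else 1) + pvPosAt xs n := by
  simp only [pvPosAt, List.take_succ_cons, List.countP_cons]
  by_cases h : x = '-' <;> simp [h] <;> omega

theorem pvPosMap_aux (xs : List Char) : ∀ (s : Int) (d : PySem.Dict Int Int) (pos : Int),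
    ((PySem.List.enumerate xs s).foldl
      (fun st p => if p.2 ≠ '-' then (st.1.insert p.1 st.2, st.2 + 1) else st) (d, pos)).2
      = pos + (xs.countP (fun c => c ≠ '-') : Int) ∧
    ∀ k : Int, ((PySem.List.enumerate xs s).foldl
      (fun st p => if p.2 ≠ '-' then (st.1.insert p.1 st.2, st.2 + 1) else st) (d, pos)).1.get? k
      = if s ≤ k ∧ k < s + xs.length ∧ xs.getD (k - s).toNat ' ' ≠ '-'
        then some (pos + (pvPosAt xs (k - s).toNat : Int))
        else d.get? k := by
  induction xs with
  | nil =>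
    intro s d pos
    rw [PySem.List.enumerate_nil]
    constructor
    · simp
    · intro k
      rw [if_neg (by rintro ⟨a, b, -⟩; simp only [List.length_nil] at b; omega)]
      simp
  | cons x xs ih =>
    intro s d pos
    rw [PySem.List.enumerate_cons]
    by_cases hx : x = '-'
    · subst hx
      simp only [List.foldl_cons]
      rw [if_neg (by simp : ¬ (((s : Int), ('-' : Char)).2 ≠ '-'))]
      obtain ⟨ih1, ih2⟩ := ih (s + 1) d pos
      constructor
      · rw [ih1]; simp [List.countP_cons]
      · intro k
        rw [ih2 k]
        by_cases h1 : s + 1 ≤ k ∧ k < s + 1 + (xs.length : Int) ∧ xs.getD (k - (s + 1)).toNat ' ' ≠ '-'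
        · rw [if_pos h1, if_pos ?side]
          case side =>
            refine ⟨by omega, by simp only [List.length_cons]; omega, ?_⟩
            have hk : (k - s).toNat = (k - (s + 1)).toNat + 1 := by omega
            rw [hk]; simpa using h1.2.2
          have hk : (k - s).toNat = (k - (s + 1)).toNat + 1 := by omega
          rw [hk, pvPosAt_cons, if_pos rfl]
          simp
        · rw [if_neg h1, if_neg ?side2]
          case side2 =>
            intro hc
            obtain ⟨hc1, hc2, hc3⟩ := hc
            apply h1
            by_cases hks : k = s
            · exfalso
              apply hc3
              have h0 : (k - s).toNat = 0 := by omega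
              rw [h0] at hc3 ⊢
              rfl
            · refine ⟨by omega, by simp only [List.length_cons] at hc2 ⊢; omega, ?_⟩
              have hk : (k - s).toNat = (k - (s + 1)).toNat + 1 := by omega
              rw [hk] at hc3; simpa using hc3
    · simp only [List.foldl_cons]
      rw [if_pos (by simpa using hx : (((s : Int), x).2 ≠ '-'))]
      obtain ⟨ih1, ih2⟩ := ih (s + 1) (d.insert s pos) (pos + 1)
      constructor
      · rw [ih1]
        simp only [List.countP_cons]
        rw [if_pos (by simpa using hx : decide (x ≠ '-') = true)]
        omega
      · intro k
        rw [ih2 k]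
        by_cases h1 : s + 1 ≤ k ∧ k < s + 1 + (xs.length : Int) ∧ xs.getD (k - (s + 1)).toNat ' ' ≠ '-'
        · rw [if_pos h1, if_pos ?sideb]
          case sideb =>
            refine ⟨by omega, by simp only [List.length_cons]; omega, ?_⟩
            have hk : (k - s).toNat = (k - (s + 1)).toNat + 1 := by omega
            rw [hk]; simpa using h1.2.2
          have hk : (k - s).toNat = (k - (s + 1)).toNat + 1 := by omega
          rw [hk, pvPosAt_cons, if_neg hx]
          simp only [Option.some.injEq]
          omega
        · rw [if_neg h1]
          by_cases hks : k = s
          · rw [hks, PySem.Dict.get?_insert_self, if_pos ?sidec]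
            case sidec =>
              refine ⟨by omega, by simp only [List.length_cons]; omega, ?_⟩
              have h0 : (s - s).toNat = 0 := by omega
              rw [h0]
              exact hx
            have h0 : (s - s).toNat = 0 := by omega
            rw [h0, pvPosAt_zero]
            simp
          · rw [PySem.Dict.get?_insert_of_ne _ _ hks, if_neg ?sided]
            case sided =>
              intro hc
              obtain ⟨hc1, hc2, hc3⟩ := hc
              apply h1
              refine ⟨by omega, by simp only [List.length_cons] at hc2 ⊢; omega, ?_⟩
              have hk : (k - s).toNat = (k - (s + 1)).toNat + 1 := by omega
              rw [hk] at hc3; simpa using hc3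

theorem pvPosMap_get (seq : List Char) (k : Int) :
    (pvPosMap seq).1.get? k
      = if 0 ≤ k ∧ k < (seq.length : Int) ∧ seq.getD k.toNat ' ' ≠ '-'
        then some ((pvPosAt seq k.toNat : Nat) : Int)
        else none := by
  have h := (pvPosMap_aux seq 0 PySem.Dict.empty 0).2 k
  unfold pvPosMap
  rw [h]
  simp only [Int.sub_zero, Int.zero_add]
  split_ifs with h1
  · rfl
  · rfl

theorem pvPosMap_snd (seq : List Char) :
    (pvPosMap seq).2 = (seq.countP (fun c => c ≠ '-') : Int) := by
  have h := (pvPosMap_aux seq 0 PySem.Dict.empty 0).1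
  unfold pvPosMap
  rw [h]
  omega

theorem pvPosAt_lt (seq : List Char) {k1 k2 : Nat} (h12 : k1 < k2) (h1 : k1 < seq.length)
    (h3 : seq.getD k1 ' ' ≠ '-') : pvPosAt seq k1 < pvPosAt seq k2 := by
  have step : pvPosAt seq k1 + 1 ≤ pvPosAt seq (k1 + 1) := by
    unfold pvPosAt
    rw [List.take_add_one, List.countP_append]
    have hget : seq[k1]? = some seq[k1] := List.getElem?_eq_getElem h1
    rw [hget]
    have hg : seq.getD k1 ' ' = seq[k1] := by simp [List.getD, hget]
    rw [hg] at h3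
    simp [h3]
  have mono : pvPosAt seq (k1 + 1) ≤ pvPosAt seq k2 := by
    unfold pvPosAt
    have hsub : (seq.take (k1 + 1)).Sublist (seq.take k2) := by
      rw [show seq.take (k1+1) = (seq.take k2).take (k1+1) by rw [List.take_take]; congr 1; omega]
      exact List.take_sublist _ _
    exact hsub.countP_le
  omega

-- ---- splice = set -----------------------------------------------------------
theorem pv_splice_set (l : List Char) (c : Char) (m : Int) (h0 : 0 ≤ m) (h : m.toNat < l.length) :
    PySem.List.slice l none (some m) ++ [c] ++ PySem.List.slice l (some (m + 1)) none
      = l.set m.toNat c := by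
  rw [PySem.List.slice_to l h0, PySem.List.slice_from l (by omega)]
  have hm : (m + 1).toNat = m.toNat + 1 := by omega
  rw [hm, List.set_eq_take_cons_drop _ h]
  simp


theorem pvApply_length (seq : List Char) (pm : PySem.Dict Int Int) (out : List Char) (e : PvEv) :
    (pvApply seq pm out e).length = out.length := by
  unfold pvApply
  cases PySem.List.pyGet? seq e.2.2.1 <;> cases PySem.List.pyGet? seq e.2.2.2 <;> simp
  split_ifs
  · rfl
  · cases pm.get? e.2.2.1 <;> cases pm.get? e.2.2.2 <;> simp [PySem.List.length_pySetD]

theorem pvApply_foldl_length (seq : List Char) (pm : PySem.Dict Int Int) :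
    ∀ (E : List PvEv) (out : List Char),
      (E.foldl (pvApply seq pm) out).length = out.length := by
  intro E
  induction E with
  | nil => intro out; rfl
  | cons e E ih => intro out; rw [List.foldl_cons, ih, pvApply_length]

theorem pvLeftOf_get (c : Char) : pvLeftOf.get? c = pvLOf c := by
  have hd : pvLeftOf = PySem.Dict.mk
      [(')', '('), ('a', 'A'), ('b', 'B'), ('c', 'C'), ('d', 'D'), ('e', 'E')] := by decide
  rw [hd]
  by_cases h1 : c = ')'; · subst h1; decide
  by_cases h2 : c = 'a'; · subst h2; decide
  by_cases h3 : c = 'b'; · subst h3; decide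
  by_cases h4 : c = 'c'; · subst h4; decide
  by_cases h5 : c = 'd'; · subst h5; decide
  by_cases h6 : c = 'e'; · subst h6; decide
  simp only [PySem.Dict.get?_mk_cons, beq_iff_eq]
  rw [if_neg (fun h => h1 h.symm), if_neg (fun h => h2 h.symm), if_neg (fun h => h3 h.symm),
      if_neg (fun h => h4 h.symm), if_neg (fun h => h5 h.symm), if_neg (fun h => h6 h.symm)]
  simp [pvLOf, h1, h2, h3, h4, h5, h6, PySem.Dict.get?]

-- ---- A's pass ---------------------------------------------------------------
theorem pv_passA (seq : List Char) (pm : PySem.Dict Int Int) (lr : Char × Char) (N : Nat)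
    (hpm : ∀ x v, pm.get? x = some v → 0 ≤ v ∧ v.toNat < N) :
    ∀ (ps : List (Int × Char)) (s bottom : List Int) (rec : List Char), rec.length = N →
      pvOk1 lr.1 lr.2 s.length ps →
      ps.foldl (pvStepA seq pm lr) (bottom ++ s.reverse, rec)
        = (bottom ++ (pvFin1 lr.1 lr.2 s ps).reverse,
           (pvRun1 lr.1 lr.2 s ps).foldl (pvApply seq pm) rec) := by
  intro ps
  induction ps with
  | nil =>
    intro s bottom rec _ _
    simp [pvRun1, pvFin1]
  | cons p ps ih =>
    intro s bottom rec hlen hok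
    simp only [List.foldl_cons]
    by_cases h1 : p.2 = lr.1
    · have hstep : pvStepA seq pm lr (bottom ++ s.reverse, rec) p
          = (bottom ++ (p.1 :: s).reverse, rec) := by
        simp [pvStepA, if_pos h1, List.reverse_cons]
      rw [hstep]
      simp only [pvOk1, if_pos h1] at hok
      simp only [pvRun1, pvFin1, if_pos h1]
      exact ih (p.1 :: s) bottom rec hlen (by simpa using hok)
    · by_cases h2 : p.2 = lr.2
      · simp only [pvOk1, if_neg h1, if_pos h2] at hok
        obtain ⟨hpos, hok⟩ := hok
        cases s with
        | nil => simp at hpos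
        | cons j t =>
          have hst : bottom ++ (j :: t).reverse = (bottom ++ t.reverse) ++ [j] := by
            simp [List.reverse_cons]
          have hpop : PySem.List.pop? (bottom ++ (j :: t).reverse) (-1)
              = some (j, bottom ++ t.reverse) := by
            rw [hst]; exact PySem.List.pop?_last _ _
          have hstep : pvStepA seq pm lr (bottom ++ (j :: t).reverse, rec) p
              = (bottom ++ t.reverse, pvApply seq pm rec (lr.1, lr.2, j, p.1)) := by
            simp only [pvStepA, if_neg h1, if_pos h2, hpop]
            unfold pvApply
            cases hj : PySem.List.pyGet? seq j <;> cases hi : PySem.List.pyGet? seq p.1 <;>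
              try rfl
            rename_i cj ci
            dsimp only
            by_cases hg : cj = '-' ∨ ci = '-'
            · rw [if_pos hg, if_pos hg]
            · rw [if_neg hg, if_neg hg]
              cases hpj : pm.get? j <;> cases hpi : pm.get? p.1 <;> try rfl
              rename_i mj mi
              dsimp only
              obtain ⟨hmj0, hmjlt⟩ := hpm _ _ hpj
              obtain ⟨hmi0, hmilt⟩ := hpm _ _ hpi
              rw [pv_splice_set rec lr.1 mj hmj0 (by omega),
                  pv_splice_set _ lr.2 mi hmi0 (by simp [List.length_set]; omega),
                  PySem.List.pySetD_of_nonneg _ _ hmj0, PySem.List.pySetD_of_nonneg _ _ hmi0]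
          rw [hstep]
          simp only [pvRun1, pvFin1, if_neg h1, if_pos h2, List.foldl_cons]
          exact ih t bottom _ (by rw [pvApply_length]; exact hlen) (by simpa using hok)
      · have hstep : pvStepA seq pm lr (bottom ++ s.reverse, rec) p
            = (bottom ++ s.reverse, rec) := by
          simp [pvStepA, if_neg h1, if_neg h2]
        rw [hstep]
        simp only [pvOk1, if_neg h1, if_neg h2] at hok
        simp only [pvRun1, pvFin1, if_neg h1, if_neg h2]
        exact ih s bottom rec hlen hok

-- ---- B's pass ---------------------------------------------------------------
def pvDinv (D : PySem.Dict Char (List Int)) (σ : Char → List Int) : Prop :=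
  (∀ c, D.contains c = pvIsLeft c) ∧ ∀ l, pvIsLeft l = true → D.get? l = some (σ l).reverse

theorem pv_passB (seq : List Char) (pm : PySem.Dict Int Int) :
    ∀ (ps : List (Int × Char)) (σ : Char → List Int) (D : PySem.Dict Char (List Int))
      (out : List Char), pvDinv D σ → pvOk σ ps →
      (ps.foldl (pvStepB seq pm) (D, out)).2
        = (pvRun σ ps).foldl (pvApply seq pm) out := by
  intro ps
  induction ps with
  | nil => intro σ D out _ _; simp [pvRun]
  | cons p ps ih =>
    intro σ D out hD hok
    obtain ⟨hDc, hDg⟩ := hD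
    simp only [List.foldl_cons]
    by_cases hL : pvIsLeft p.2 = true
    · have hget : D.get? p.2 = some (σ p.2).reverse := hDg p.2 hL
      have hstep : pvStepB seq pm (D, out) p
          = (D.insert p.2 ((pvPush σ p.2 p.1 p.2).reverse), out) := by
        simp [pvStepB, hDc p.2, hL, hget, pvPush, List.reverse_cons]
      rw [hstep]
      simp only [pvOk, hL, if_true] at hok
      simp only [pvRun, hL, if_true]
      refine ih _ _ _ ⟨?_, ?_⟩ hok
      · intro c
        rw [PySem.Dict.contains_insert]
        by_cases hc : c = p.2 <;> simp [hc, hDc c, hL]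
      · intro l hl
        by_cases hlp : l = p.2
        · subst hlp; rw [PySem.Dict.get?_insert_self]
        · rw [PySem.Dict.get?_insert_of_ne _ _ hlp, hDg l hl]
          simp [pvPush, hlp]
    · have hLf : pvIsLeft p.2 = false := by simpa using hL
      cases hlo : pvLOf p.2 with
      | some l =>
        have hll := pv_isLeft_of_lOf hlo
        have hc2 : pvLeftOf.contains p.2 = true := by
          cases hco : pvLeftOf.contains p.2
          · have := (PySem.Dict.get?_eq_none_iff_contains _ _).2 hco
            rw [pvLeftOf_get, hlo] at this; cases this
          · rfl
        simp only [pvOk, hL, if_false, hlo] at hok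
        obtain ⟨hne, hok⟩ := hok
        cases hσ : σ l with
        | nil => exact absurd hσ hne
        | cons j t =>
          have hget : D.get? l = some (t.reverse ++ [j]) := by
            rw [hDg l hll.2, hσ]; simp [List.reverse_cons]
          have hpop : PySem.List.pop? ((D.get? l).getD []) (-1) = some (j, t.reverse) := by
            rw [hget]; exact PySem.List.pop?_last _ _
          have hstep : pvStepB seq pm (D, out) p
              = (D.insert l t.reverse, pvApply seq pm out (l, p.2, j, p.1)) := by
            simp only [pvStepB, hDc p.2, hLf, Bool.false_eq_true, if_false, hc2, if_true,
              pvLeftOf_get, hlo, Option.getD_some, hpop]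
            unfold pvApply
            cases hj : PySem.List.pyGet? seq j <;> cases hi : PySem.List.pyGet? seq p.1 <;>
              try rfl
            rename_i cj ci
            dsimp only
            by_cases hg : cj = '-' ∨ ci = '-'
            · rw [if_pos hg, if_pos hg]
            · rw [if_neg hg, if_neg hg]
              cases hpj : pm.get? j <;> cases hpi : pm.get? p.1 <;> rfl
          rw [hstep]
          simp only [pvRun, hL, if_false, hlo, hσ, List.foldl_cons]
          refine ih _ _ _ ⟨?_, ?_⟩ hok
          · intro c
            rw [PySem.Dict.contains_insert]
            by_cases hc : c = l <;> simp [hc, hDc c, hll.2]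
          · intro l' hl'
            by_cases hlp : l' = l
            · subst hlp
              rw [PySem.Dict.get?_insert_self]
              simp [pvPop, hσ]
            · rw [PySem.Dict.get?_insert_of_ne _ _ hlp, hDg l' hl']
              simp [pvPop, hlp]
      | none =>
        have hc2 : pvLeftOf.contains p.2 = false := by
          have : pvLeftOf.get? p.2 = none := by rw [pvLeftOf_get, hlo]
          exact (PySem.Dict.get?_eq_none_iff_contains _ _).1 this
        have hstep : pvStepB seq pm (D, out) p = (D, out) := by
          simp [pvStepB, hDc p.2, hLf, hc2]
        rw [hstep]
        simp only [pvOk, hL, if_false, hlo] at hok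
        simp only [pvRun, hL, if_false, hlo]
        exact ih _ _ _ ⟨hDc, hDg⟩ hok

theorem pvStacks0_get (c : Char) :
    pvStacks0.get? c = if pvIsLeft c then some [] else none := by
  have hd : pvStacks0 = PySem.Dict.mk
      [('(', ([] : List Int)), ('A', []), ('B', []), ('C', []), ('D', []), ('E', [])] := by decide
  rw [hd]
  by_cases h1 : c = '('; · subst h1; decide
  by_cases h2 : c = 'A'; · subst h2; decide
  by_cases h3 : c = 'B'; · subst h3; decide
  by_cases h4 : c = 'C'; · subst h4; decide
  by_cases h5 : c = 'D'; · subst h5; decide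
  by_cases h6 : c = 'E'; · subst h6; decide
  have hnl : pvIsLeft c = false := by
    simp [pvIsLeft, pvLefts, h1, h2, h3, h4, h5, h6]
  rw [hnl, if_neg (by simp)]
  simp only [PySem.Dict.get?_mk_cons, beq_iff_eq]
  rw [if_neg (fun h => h1 h.symm), if_neg (fun h => h2 h.symm), if_neg (fun h => h3 h.symm),
      if_neg (fun h => h4 h.symm), if_neg (fun h => h5 h.symm), if_neg (fun h => h6 h.symm)]
  rfl

theorem pvDinv0 : pvDinv pvStacks0 (fun _ => []) := by
  constructor
  · intro c
    cases hL : pvIsLeft c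
    · have : pvStacks0.get? c = none := by rw [pvStacks0_get, hL]; rfl
      exact (PySem.Dict.get?_eq_none_iff_contains _ _).1 this
    · have hg : pvStacks0.get? c = some [] := by rw [pvStacks0_get, hL]; rfl
      cases hco : pvStacks0.contains c
      · have := (PySem.Dict.get?_eq_none_iff_contains _ _).2 hco
        rw [hg] at this; cases this
      · rfl
  · intro l hl
    rw [pvStacks0_get, hl]
    rfl

-- ---- ok from counts ---------------------------------------------------------
theorem pv_ok1_of_counts (l r : Char) : ∀ (ps : List (Int × Char)) (h : Nat),
    (∀ k, k ≤ ps.length →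
      ((ps.map (·.2)).take k).count r ≤ h + ((ps.map (·.2)).take k).count l) →
    pvOk1 l r h ps := by
  intro ps
  induction ps with
  | nil => intro h _; trivial
  | cons p ps ih =>
    intro h hyp
    simp only [pvOk1]
    by_cases h1 : p.2 = l
    · rw [if_pos h1]
      apply ih
      intro k hk
      have hcalls := hyp (k + 1) (by simp only [List.length_cons]; omega)
      simp only [List.map_cons, List.take_succ_cons, List.count_cons, beq_iff_eq] at hcalls
      split_ifs at hcalls <;> first | omega | simp_all
    · by_cases h2 : p.2 = r
      · rw [if_neg h1, if_pos h2]
        have hone := hyp 1 (by simp only [List.length_cons]; omega)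
        simp only [List.map_cons, List.take_succ_cons, List.take_zero, List.count_cons,
          List.count_nil, beq_iff_eq] at hone
        constructor
        · split_ifs at hone <;> first | omega | simp_all
        · apply ih
          intro k hk
          have hcalls := hyp (k + 1) (by simp only [List.length_cons]; omega)
          simp only [List.map_cons, List.take_succ_cons, List.count_cons, beq_iff_eq] at hcalls
          split_ifs at hcalls <;> first | omega | simp_all
      · rw [if_neg h1, if_neg h2]
        apply ih
        intro k hk
        have hcalls := hyp (k + 1) (by simp only [List.length_cons]; omega)
        simp only [List.map_cons, List.take_succ_cons, List.count_cons, beq_iff_eq] at hcalls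
        split_ifs at hcalls <;> first | omega | simp_all

theorem pv_ok_of_ok1 : ∀ (ps : List (Int × Char)) (σ : Char → List Int),
    (∀ lr ∈ pvPairs, pvOk1 lr.1 lr.2 (σ lr.1).length ps) → pvOk σ ps := by
  intro ps
  induction ps with
  | nil => intro σ _; trivial
  | cons p ps ih =>
    intro σ hall
    simp only [pvOk]
    by_cases hL : pvIsLeft p.2 = true
    · rw [if_pos hL]
      apply ih
      intro lr hlr
      have h1 := hall lr hlr
      by_cases he : p.2 = lr.1
      · simp only [pvOk1, if_pos he] at h1
        have hp : pvPush σ p.2 p.1 lr.1 = p.1 :: σ lr.1 := by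
          simp [pvPush, he.symm]
        rw [hp]
        simpa using h1
      · have hr : p.2 ≠ lr.2 := by
          intro hc
          have := pv_right_notLeft lr hlr
          rw [← hc, hL] at this; cases this
        simp only [pvOk1, if_neg he, if_neg hr] at h1
        have hp : pvPush σ p.2 p.1 lr.1 = σ lr.1 := by
          have hne : ¬ lr.1 = p.2 := fun hh => he hh.symm
          simp [pvPush, hne]
        rw [hp]
        exact h1
    · have hLf : pvIsLeft p.2 = false := by simpa using hL
      rw [hLf]
      simp only [Bool.false_eq_true, if_false]
      cases hlo : pvLOf p.2 with
      | some l =>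
        have hmem := pv_lOf_mem hlo
        have hnl : p.2 ≠ l := by
          intro hc
          have := pv_left_isLeft (l, p.2) hmem
          simp only at this
          rw [← hc, hLf] at this; cases this
        have h1 := hall (l, p.2) hmem
        simp only [pvOk1, if_neg hnl, if_pos rfl] at h1
        refine ⟨by intro hc; rw [hc] at h1; simp at h1, ?_⟩
        apply ih
        intro lr hlr
        have h2 := hall lr hlr
        by_cases hrr : p.2 = lr.2
        · have hl1 : lr.1 = l := pv_rights_det lr hlr (l, p.2) hmem hrr.symm
          have hne1 : p.2 ≠ lr.1 := by
            intro hc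
            have := pv_left_isLeft lr hlr
            rw [← hc, hLf] at this; cases this
          simp only [pvOk1, if_neg hne1, if_pos hrr] at h2
          have hp : pvPop σ l lr.1 = (σ lr.1).tail := by simp [pvPop, hl1]
          rw [hp, List.length_tail]
          exact h2.2
        · have hne1 : p.2 ≠ lr.1 := by
            intro hc
            have := pv_left_isLeft lr hlr
            rw [← hc, hLf] at this; cases this
          simp only [pvOk1, if_neg hne1, if_neg hrr] at h2
          have hll : lr.1 ≠ l := by
            intro hc
            exact hrr (pv_lefts_det (l, p.2) hmem lr hlr hc.symm)
          have hp : pvPop σ l lr.1 = σ lr.1 := by simp [pvPop, hll]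
          rw [hp]
          exact h2
      | none =>
        apply ih
        intro lr hlr
        have h1 := hall lr hlr
        have hne1 : p.2 ≠ lr.1 := by
          intro hc
          have := pv_left_isLeft lr hlr
          rw [← hc, hLf] at this; cases this
        have hne2 : p.2 ≠ lr.2 := by
          intro hc
          have := pv_lOf_right lr hlr
          rw [← hc, hlo] at this; cases this
        simpa only [pvOk1, if_neg hne1, if_neg hne2] using h1

-- ---- run1 = filtered run ----------------------------------------------------
theorem pv_run1_filter {l r : Char} (hlr : (l, r) ∈ pvPairs) :
    ∀ (ps : List (Int × Char)) (σ : Char → List Int), pvOk σ ps →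
      pvRun1 l r (σ l) ps = (pvRun σ ps).filter (fun e => e.1 = l) := by
  have hisl : pvIsLeft l = true := pv_left_isLeft (l, r) hlr
  have hisr : pvIsLeft r = false := pv_right_notLeft (l, r) hlr
  intro ps
  induction ps with
  | nil => intro σ _; rfl
  | cons p ps ih =>
    intro σ hok
    by_cases hL : pvIsLeft p.2 = true
    · simp only [pvOk, if_pos hL] at hok
      simp only [pvRun, if_pos hL]
      by_cases he : p.2 = l
      · have h1 : pvRun1 l r (σ l) (p :: ps) = pvRun1 l r (p.1 :: σ l) ps := by
          simp only [pvRun1, if_pos he]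
        rw [h1]
        have hp : pvPush σ p.2 p.1 l = p.1 :: σ l := by simp [pvPush, he.symm]
        rw [← hp]
        exact ih _ hok
      · have hr : p.2 ≠ r := by intro hc; rw [hc, hisr] at hL; cases hL
        have h1 : pvRun1 l r (σ l) (p :: ps) = pvRun1 l r (σ l) ps := by
          simp only [pvRun1, if_neg he, if_neg hr]
        rw [h1]
        have hp : pvPush σ p.2 p.1 l = σ l := by
          have hne : ¬ l = p.2 := fun hh => he hh.symm
          simp [pvPush, hne]
        rw [← hp]
        exact ih _ hok
    · have hLf : pvIsLeft p.2 = false := by simpa using hL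
      have hnl : p.2 ≠ l := by intro hc; rw [hc, hisl] at hLf; cases hLf
      cases hlo : pvLOf p.2 with
      | some l' =>
        simp only [pvOk, hLf, Bool.false_eq_true, if_false, hlo] at hok
        obtain ⟨hne, hok⟩ := hok
        cases hσ : σ l' with
        | nil => exact absurd hσ hne
        | cons j t =>
          simp only [pvRun, hLf, Bool.false_eq_true, if_false, hlo, hσ]
          by_cases hel : l' = l
          · subst hel
            have hpr : p.2 = r := pv_lefts_det (l', p.2) (pv_lOf_mem hlo) (l', r) hlr rfl
            have h1 : pvRun1 l' r (σ l') (p :: ps) = (l', r, j, p.1) :: pvRun1 l' r t ps := by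
              simp only [pvRun1, if_neg hnl, if_pos hpr, hσ]
            rw [h1, List.filter_cons, if_pos (by simp), hpr]
            have hp : pvPop σ l' l' = t := by simp [pvPop, hσ]
            rw [← hp, ih _ hok]
          · have hpr : p.2 ≠ r := by
              intro hc
              have h2 := pv_lOf_right (l, r) hlr
              rw [← hc] at h2
              exact hel (Option.some.inj (hlo.symm.trans h2))
            have h1 : pvRun1 l r (σ l) (p :: ps) = pvRun1 l r (σ l) ps := by
              simp only [pvRun1, if_neg hnl, if_neg hpr]
            rw [h1, List.filter_cons, if_neg (by simp [hel])]
            have hp : pvPop σ l' l = σ l := by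
              have hne : ¬ l = l' := fun hh => hel hh.symm
              simp [pvPop, hne]
            rw [← hp]
            exact ih _ hok
      | none =>
        simp only [pvOk, hLf, Bool.false_eq_true, if_false, hlo] at hok
        simp only [pvRun, hLf, Bool.false_eq_true, if_false, hlo]
        have hpr : p.2 ≠ r := by
          intro hc
          have := pv_lOf_right (l, r) hlr
          rw [← hc, hlo] at this; cases this
        have h1 : pvRun1 l r (σ l) (p :: ps) = pvRun1 l r (σ l) ps := by
          simp only [pvRun1, if_neg hnl, if_neg hpr]
        rw [h1]
        exact ih _ hok


theorem pv_flatMap_congr_notmem {w : List Char} {σ σ' : Char → List Int} (c : Char)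
    (hσ : ∀ x, x ≠ c → σ' x = σ x) (hw : c ∉ w) : w.flatMap σ' = w.flatMap σ := by
  induction w with
  | nil => rfl
  | cons a w ih =>
    simp only [List.flatMap_cons]
    rw [hσ a (by rintro rfl; exact hw List.mem_cons_self),
        ih (fun h => hw (List.mem_cons_of_mem _ h))]

theorem pv_lefts_split {c : Char} (hc : c ∈ pvLefts) :
    ∃ u v, pvLefts = u ++ c :: v ∧ c ∉ u ∧ c ∉ v := by
  obtain ⟨u, v, huv⟩ := List.append_of_mem hc
  have hnd := pv_lefts_nodup
  rw [huv] at hnd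
  rcases List.nodup_append.1 hnd with ⟨_, hcv, hdisj⟩
  exact ⟨u, v, huv, fun h => hdisj c h c List.mem_cons_self rfl,
    (List.nodup_cons.1 hcv).1⟩

theorem pv_bag_push (σ : Char → List Int) {c : Char} (hc : pvIsLeft c = true) (i : Int) :
    (pvBag (pvPush σ c i)).Perm (i :: pvBag σ) := by
  have hcm : c ∈ pvLefts := by simpa [pvIsLeft] using hc
  obtain ⟨u, v, huv, hcu, hcv⟩ := pv_lefts_split hcm
  unfold pvBag
  rw [huv, List.flatMap_append, List.flatMap_cons, List.flatMap_append, List.flatMap_cons]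
  rw [pv_flatMap_congr_notmem (σ := σ) (σ' := pvPush σ c i) c
        (fun x hx => by simp [pvPush, hx]) hcu,
      pv_flatMap_congr_notmem (σ := σ) (σ' := pvPush σ c i) c
        (fun x hx => by simp [pvPush, hx]) hcv]
  have hcc : pvPush σ c i c = i :: σ c := by simp [pvPush]
  rw [hcc]
  have hp := List.perm_middle (a := i) (l₁ := List.flatMap σ u) (l₂ := σ c ++ List.flatMap σ v)
  simpa [List.append_assoc] using hp

theorem pv_bag_pop (σ : Char → List Int) {c : Char} (hc : pvIsLeft c = true) {j : Int}
    {t : List Int} (hσ : σ c = j :: t) : (pvBag σ).Perm (j :: pvBag (pvPop σ c)) := by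
  have hcm : c ∈ pvLefts := by simpa [pvIsLeft] using hc
  obtain ⟨u, v, huv, hcu, hcv⟩ := pv_lefts_split hcm
  unfold pvBag
  rw [huv, List.flatMap_append, List.flatMap_cons, List.flatMap_append, List.flatMap_cons]
  rw [pv_flatMap_congr_notmem (σ := σ) (σ' := pvPop σ c) c
        (fun x hx => by simp [pvPop, hx]) hcu,
      pv_flatMap_congr_notmem (σ := σ) (σ' := pvPop σ c) c
        (fun x hx => by simp [pvPop, hx]) hcv]
  have hcc : pvPop σ c c = t := by simp [pvPop, hσ]
  rw [hcc, hσ]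
  have hp := List.perm_middle (a := j) (l₁ := List.flatMap σ u)
    (l₂ := t ++ List.flatMap σ v)
  simpa [List.append_assoc] using hp

-- ---- index invariants -------------------------------------------------------
theorem pv_run_inv : ∀ (ps : List (Int × Char)) (σ : Char → List Int),
    (pvBag σ).Nodup →
    (∀ x ∈ pvBag σ, ∀ q ∈ ps, x < q.1) →
    ps.Pairwise (fun a b => a.1 < b.1) →
    ((pvRun σ ps).flatMap pvIdx).Nodup ∧
    ∀ x ∈ (pvRun σ ps).flatMap pvIdx, x ∈ pvBag σ ∨ ∃ q ∈ ps, x = q.1 := by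
  intro ps
  induction ps with
  | nil =>
    intro σ _ _ _
    exact ⟨by simp [pvRun], by simp [pvRun]⟩
  | cons p ps ih =>
    intro σ hnd hb hpw
    obtain ⟨hpw1, hpw2⟩ := List.pairwise_cons.1 hpw
    by_cases hL : pvIsLeft p.2 = true
    · simp only [pvRun, if_pos hL]
      have hperm := pv_bag_push σ hL p.1
      have hnd' : (pvBag (pvPush σ p.2 p.1)).Nodup := by
        refine hperm.nodup_iff.2 (List.nodup_cons.2 ⟨?_, hnd⟩)
        intro hmem
        exact absurd (hb p.1 hmem p List.mem_cons_self) (by omega)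
      have hb' : ∀ x ∈ pvBag (pvPush σ p.2 p.1), ∀ q ∈ ps, x < q.1 := by
        intro x hx q hq
        rcases List.mem_cons.1 (hperm.mem_iff.1 hx) with h | h
        · rw [h]; exact hpw1 q hq
        · exact hb x h q (List.mem_cons_of_mem _ hq)
      obtain ⟨ih1, ih2⟩ := ih _ hnd' hb' hpw2
      refine ⟨ih1, ?_⟩
      intro x hx
      rcases ih2 x hx with h | ⟨q, hq, hxq⟩
      · rcases List.mem_cons.1 (hperm.mem_iff.1 h) with h' | h'
        · exact Or.inr ⟨p, List.mem_cons_self, h'⟩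
        · exact Or.inl h'
      · exact Or.inr ⟨q, List.mem_cons_of_mem _ hq, hxq⟩
    · have hLf : pvIsLeft p.2 = false := by simpa using hL
      have hbtail : ∀ x ∈ pvBag σ, ∀ q ∈ ps, x < q.1 :=
        fun x hx q hq => hb x hx q (List.mem_cons_of_mem _ hq)
      cases hlo : pvLOf p.2 with
      | some l =>
        cases hσ : σ l with
        | nil =>
          simp only [pvRun, hLf, Bool.false_eq_true, if_false, hlo, hσ]
          obtain ⟨ih1, ih2⟩ := ih σ hnd hbtail hpw2
          refine ⟨ih1, ?_⟩
          intro x hx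
          rcases ih2 x hx with h | ⟨q, hq, hxq⟩
          · exact Or.inl h
          · exact Or.inr ⟨q, List.mem_cons_of_mem _ hq, hxq⟩
        | cons j t =>
          simp only [pvRun, hLf, Bool.false_eq_true, if_false, hlo, hσ]
          have hLl : pvIsLeft l = true := (pv_isLeft_of_lOf hlo).2
          have hperm := pv_bag_pop σ hLl hσ
          have hj_bag : j ∈ pvBag σ := hperm.mem_iff.2 List.mem_cons_self
          have hnodup' := hperm.nodup_iff.1 hnd
          have hnd' : (pvBag (pvPop σ l)).Nodup := (List.nodup_cons.1 hnodup').2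
          have hjnot : j ∉ pvBag (pvPop σ l) := (List.nodup_cons.1 hnodup').1
          have hsub : ∀ x ∈ pvBag (pvPop σ l), x ∈ pvBag σ :=
            fun x hx => hperm.mem_iff.2 (List.mem_cons_of_mem _ hx)
          have hb' : ∀ x ∈ pvBag (pvPop σ l), ∀ q ∈ ps, x < q.1 :=
            fun x hx q hq => hbtail x (hsub x hx) q hq
          obtain ⟨ih1, ih2⟩ := ih _ hnd' hb' hpw2
          constructor
          · simp only [List.flatMap_cons, pvIdx, List.cons_append, List.nil_append]
            refine List.nodup_cons.2 ⟨?_, List.nodup_cons.2 ⟨?_, ih1⟩⟩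
            · intro hmem
              rcases List.mem_cons.1 hmem with h | h
              · exact absurd (hb j hj_bag p List.mem_cons_self) (by omega)
              · rcases ih2 j h with hbag | ⟨q, hq, hjq⟩
                · exact hjnot hbag
                · exact absurd (hjq ▸ hb j hj_bag q (List.mem_cons_of_mem _ hq)) (by omega)
            · intro h
              rcases ih2 p.1 h with hbag | ⟨q, hq, hpq⟩
              · exact absurd (hb p.1 (hsub p.1 hbag) p List.mem_cons_self) (by omega)
              · exact absurd (hpq ▸ hpw1 q hq) (by omega)
          · intro x hx
            simp only [List.flatMap_cons, pvIdx, List.cons_append, List.nil_append,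
              List.mem_cons] at hx
            rcases hx with rfl | hx
            · exact Or.inl hj_bag
            · rcases hx with rfl | hx
              · exact Or.inr ⟨p, List.mem_cons_self, rfl⟩
              · rcases ih2 x hx with hbag | ⟨q, hq, hxq⟩
                · exact Or.inl (hsub x hbag)
                · exact Or.inr ⟨q, List.mem_cons_of_mem _ hq, hxq⟩
      | none =>
        simp only [pvRun, hLf, Bool.false_eq_true, if_false, hlo]
        obtain ⟨ih1, ih2⟩ := ih σ hnd hbtail hpw2
        refine ⟨ih1, ?_⟩
        intro x hx
        rcases ih2 x hx with h | ⟨q, hq, hxq⟩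
        · exact Or.inl h
        · exact Or.inr ⟨q, List.mem_cons_of_mem _ hq, hxq⟩

theorem pv_run_fst : ∀ (ps : List (Int × Char)) (σ : Char → List Int),
    ∀ e ∈ pvRun σ ps, pvIsLeft e.1 = true := by
  intro ps
  induction ps with
  | nil => intro σ e he; cases he
  | cons p ps ih =>
    intro σ e he
    by_cases hL : pvIsLeft p.2 = true
    · simp only [pvRun, if_pos hL] at he
      exact ih _ e he
    · have hLf : pvIsLeft p.2 = false := by simpa using hL
      cases hlo : pvLOf p.2 with
      | some l =>
        simp only [pvRun, hLf, Bool.false_eq_true, if_false, hlo] at he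
        cases hσ : σ l with
        | nil => rw [hσ] at he; exact ih _ e he
        | cons j t =>
          rw [hσ] at he
          rcases List.mem_cons.1 he with h | h
          · rw [h]
            exact (pv_isLeft_of_lOf hlo).2
          · exact ih _ e h
      | none =>
        simp only [pvRun, hLf, Bool.false_eq_true, if_false, hlo] at he
        exact ih _ e he

-- ---- commutation & permutation ---------------------------------------------
theorem pvApply_shape (seq : List Char) (pm : PySem.Dict Int Int)
    (hnn : ∀ x v, pm.get? x = some v → 0 ≤ v) (e : PvEv) :
    (∀ out : List Char, pvApply seq pm out e = out) ∨
    ∃ v1 v2, pm.get? e.2.2.1 = some v1 ∧ pm.get? e.2.2.2 = some v2 ∧ 0 ≤ v1 ∧ 0 ≤ v2 ∧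
      ∀ out : List Char, pvApply seq pm out e = (out.set v1.toNat e.1).set v2.toNat e.2.1 := by
  cases hj : PySem.List.pyGet? seq e.2.2.1 with
  | none => exact Or.inl (fun out => by simp only [pvApply, hj])
  | some cj =>
    cases hi : PySem.List.pyGet? seq e.2.2.2 with
    | none => exact Or.inl (fun out => by simp only [pvApply, hj, hi])
    | some ci =>
      by_cases hg : cj = '-' ∨ ci = '-'
      · exact Or.inl (fun out => by simp only [pvApply, hj, hi]; rw [if_pos hg])
      · cases hpj : pm.get? e.2.2.1 with
        | none => exact Or.inl (fun out => by simp only [pvApply, hj, hi, hpj]; rw [if_neg hg])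
        | some mj =>
          cases hpi : pm.get? e.2.2.2 with
          | none => exact Or.inl (fun out => by simp only [pvApply, hj, hi, hpj, hpi]; rw [if_neg hg])
          | some mi =>
            refine Or.inr ⟨mj, mi, rfl, rfl, hnn _ _ hpj, hnn _ _ hpi, fun out => ?_⟩
            simp only [pvApply, hj, hi, hpj, hpi]
            rw [if_neg hg, PySem.List.pySetD_of_nonneg _ _ (hnn _ _ hpj),
                PySem.List.pySetD_of_nonneg _ _ (hnn _ _ hpi)]

theorem pv_apply_comm (seq : List Char) (pm : PySem.Dict Int Int)
    (hnn : ∀ x v, pm.get? x = some v → 0 ≤ v)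
    (hinj : ∀ x y vx vy, pm.get? x = some vx → pm.get? y = some vy → x ≠ y → vx ≠ vy)
    (e f : PvEv)
    (hd : e.2.2.1 ≠ f.2.2.1 ∧ e.2.2.1 ≠ f.2.2.2 ∧ e.2.2.2 ≠ f.2.2.1 ∧ e.2.2.2 ≠ f.2.2.2)
    (out : List Char) :
    pvApply seq pm (pvApply seq pm out e) f = pvApply seq pm (pvApply seq pm out f) e := by
  rcases pvApply_shape seq pm hnn e with he | ⟨a1, a2, ha1, ha2, ha10, ha20, he⟩ <;>
    rcases pvApply_shape seq pm hnn f with hf | ⟨b1, b2, hb1, hb2, hb10, hb20, hf⟩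
  · simp only [he, hf]
  · simp only [he, hf]
  · simp only [he, hf]
  · obtain ⟨hd1, hd2, hd3, hd4⟩ := hd
    have n11 : a1.toNat ≠ b1.toNat := by
      have := hinj _ _ _ _ ha1 hb1 hd1; omega
    have n12 : a1.toNat ≠ b2.toNat := by
      have := hinj _ _ _ _ ha1 hb2 hd2; omega
    have n21 : a2.toNat ≠ b1.toNat := by
      have := hinj _ _ _ _ ha2 hb1 hd3; omega
    have n22 : a2.toNat ≠ b2.toNat := by
      have := hinj _ _ _ _ ha2 hb2 hd4; omega
    simp only [he, hf]
    apply List.ext_getElem (by simp)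
    intro n h1 h2
    simp only [List.getElem_set]
    split_ifs <;> first | rfl | omega

theorem pv_partition_perm (E : List PvEv) :
    ∀ (L : List (Char × Char)), (L.map (·.1)).Nodup →
      (∀ e ∈ E, e.1 ∈ L.map (·.1)) →
      (L.flatMap (fun lr => E.filter (fun e => e.1 = lr.1))).Perm E := by
  intro L
  induction L generalizing E with
  | nil =>
    intro _ hmem
    cases E with
    | nil => simp
    | cons e E => exact absurd (hmem e List.mem_cons_self) (by simp)
  | cons lr L ih =>
    intro hnd hmem
    simp only [List.flatMap_cons]
    have hnd2 : (L.map (·.1)).Nodup ∧ lr.1 ∉ (L.map (·.1)) := by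
      simp only [List.map_cons, List.nodup_cons] at hnd
      exact ⟨hnd.2, hnd.1⟩
    have hE' := ih (E.filter fun e => !decide (e.1 = lr.1)) hnd2.1 ?memside
    case memside =>
      intro e he
      have hin := List.mem_filter.1 he
      have hm := hmem e hin.1
      simp only [List.map_cons, List.mem_cons] at hm
      rcases hm with h | h
      · exfalso
        have := hin.2
        simp [h] at this
      · exact h
    have hflat : (L.flatMap fun lr' => E.filter (fun e => decide (e.1 = lr'.1)))
        = L.flatMap fun lr' =>
            (E.filter fun e => !decide (e.1 = lr.1)).filter (fun e => decide (e.1 = lr'.1)) := by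
      apply List.flatMap_congr
      intro lr' hlr'
      have hne : lr'.1 ≠ lr.1 := by
        intro hc
        exact hnd2.2 (hc ▸ List.mem_map_of_mem hlr')
      rw [List.filter_filter]
      apply List.filter_congr
      intro e _
      by_cases hc : e.1 = lr'.1 <;> simp [hc, hne]
    rw [hflat]
    exact (List.Perm.append_left _ hE').trans (List.filter_append_perm _ E)


-- ---- assembling the passes --------------------------------------------------
theorem pv_passesA (seq : List Char) (pm : PySem.Dict Int Int) (N : Nat)
    (hpm : ∀ x v, pm.get? x = some v → 0 ≤ v ∧ v.toNat < N) :
    ∀ (L : List (Char × Char)) (ps : List (Int × Char)) (bottom : List Int) (rec : List Char),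
      rec.length = N → (∀ lr ∈ L, pvOk1 lr.1 lr.2 0 ps) →
      (L.foldl (fun st lr => ps.foldl (pvStepA seq pm lr) st) (bottom, rec)).2
        = (L.flatMap (fun lr => pvRun1 lr.1 lr.2 [] ps)).foldl (pvApply seq pm) rec := by
  intro L
  induction L with
  | nil => intro ps bottom rec _ _; simp
  | cons lr L ih =>
    intro ps bottom rec hlen hall
    simp only [List.foldl_cons, List.flatMap_cons]
    have hfirst := pv_passA seq pm lr N hpm ps [] bottom rec hlen
      (by simpa using hall lr List.mem_cons_self)
    rw [show (bottom, rec) = (bottom ++ List.reverse ([] : List Int), rec) by simp, hfirst,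
      List.foldl_append]
    exact ih ps _ _ (by rw [pvApply_foldl_length]; exact hlen)
      (fun lr' h => hall lr' (List.mem_cons_of_mem _ h))

theorem pv_nodup_pairwise {E : List PvEv} (h : (E.flatMap pvIdx).Nodup) :
    E.Pairwise (fun e f => e.2.2.1 ≠ f.2.2.1 ∧ e.2.2.1 ≠ f.2.2.2 ∧
      e.2.2.2 ≠ f.2.2.1 ∧ e.2.2.2 ≠ f.2.2.2) := by
  induction E with
  | nil => exact List.Pairwise.nil
  | cons e E ih =>
    simp only [List.flatMap_cons] at h
    rcases List.nodup_append.1 h with ⟨_, h2, hdisj⟩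
    refine List.pairwise_cons.2 ⟨?_, ih h2⟩
    intro f hf
    have hj : e.2.2.1 ∈ pvIdx e := by simp [pvIdx]
    have hi : e.2.2.2 ∈ pvIdx e := by simp [pvIdx]
    have hfj : f.2.2.1 ∈ E.flatMap pvIdx := List.mem_flatMap.2 ⟨f, hf, by simp [pvIdx]⟩
    have hfi : f.2.2.2 ∈ E.flatMap pvIdx := List.mem_flatMap.2 ⟨f, hf, by simp [pvIdx]⟩
    exact ⟨hdisj _ hj _ hfj, hdisj _ hj _ hfi, hdisj _ hi _ hfj, hdisj _ hi _ hfi⟩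

theorem pvPosAt_full (seq : List Char) :
    pvPosAt seq seq.length = seq.countP (fun c => c ≠ '-') := by
  unfold pvPosAt
  rw [List.take_length]

-- ===== VERDICT (by name: the statement is the Claim_ definition above) =====
theorem recover_ss_spec : Claim_equal_recover_ss := by
  intro css seq_with_gaps _ hpre
  unfold Spec_recover_ss recover_ss recover_ss_alt
  simp only []
  congr 1
  -- abbreviations
  have hbase : PySem.List.pyRepeat ['.'] (pvPosMap seq_with_gaps.toList).2
      = List.replicate (seq_with_gaps.toList.countP (fun c => c ≠ '-')) '.' := by
    rw [PySem.List.pyRepeat_singleton, pvPosMap_snd, Int.toNat_natCast]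
  rw [hbase]
  -- facts about pos_map
  have hpm : ∀ x v, (pvPosMap seq_with_gaps.toList).1.get? x = some v →
      0 ≤ v ∧ v.toNat < seq_with_gaps.toList.countP (fun c => c ≠ '-') := by
    intro x v h
    rw [pvPosMap_get] at h
    by_cases hc : 0 ≤ x ∧ x < (seq_with_gaps.toList.length : Int) ∧
        seq_with_gaps.toList.getD x.toNat ' ' ≠ '-'
    · rw [if_pos hc] at h
      obtain ⟨h0, hlen, hg⟩ := hc
      have hv := Option.some.inj h
      have hlt : pvPosAt seq_with_gaps.toList x.toNat
          < pvPosAt seq_with_gaps.toList seq_with_gaps.toList.length :=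
        pvPosAt_lt _ (by omega) (by omega) hg
      rw [pvPosAt_full] at hlt
      omega
    · rw [if_neg hc] at h
      cases h
  have hnn : ∀ x v, (pvPosMap seq_with_gaps.toList).1.get? x = some v → 0 ≤ v :=
    fun x v h => (hpm x v h).1
  have hinj : ∀ x y vx vy, (pvPosMap seq_with_gaps.toList).1.get? x = some vx →
      (pvPosMap seq_with_gaps.toList).1.get? y = some vy → x ≠ y → vx ≠ vy := by
    intro x y vx vy hx hy hxy
    rw [pvPosMap_get] at hx hy
    by_cases hcx : 0 ≤ x ∧ x < (seq_with_gaps.toList.length : Int) ∧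
        seq_with_gaps.toList.getD x.toNat ' ' ≠ '-'
    · by_cases hcy : 0 ≤ y ∧ y < (seq_with_gaps.toList.length : Int) ∧
          seq_with_gaps.toList.getD y.toNat ' ' ≠ '-'
      · rw [if_pos hcx] at hx
        rw [if_pos hcy] at hy
        obtain ⟨hx0, hxlen, hxg⟩ := hcx
        obtain ⟨hy0, hylen, hyg⟩ := hcy
        have hvx := Option.some.inj hx
        have hvy := Option.some.inj hy
        have hne : x.toNat ≠ y.toNat := by omega
        rcases Nat.lt_or_ge x.toNat y.toNat with hlt | hge
        · have := pvPosAt_lt seq_with_gaps.toList hlt (by omega) hxg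
          omega
        · have hlt : y.toNat < x.toNat := by omega
          have := pvPosAt_lt seq_with_gaps.toList hlt (by omega) hyg
          omega
      · rw [if_neg hcy] at hy
        cases hy
    · rw [if_neg hcx] at hx
      cases hx
  -- balance of each bracket type
  have okall : ∀ lr ∈ pvPairs,
      pvOk1 lr.1 lr.2 0 (PySem.List.enumerate css.toList 0) := by
    intro lr hlr
    apply pv_ok1_of_counts
    intro k hk
    rw [PySem.List.map_snd_enumerate]
    have hk' : k ≤ css.toList.length := by rwa [PySem.List.length_enumerate] at hk
    have := hpre.1 lr (by simpa [pvPairs] using hlr) k hk'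
    omega
  have hok : pvOk (fun _ => []) (PySem.List.enumerate css.toList 0) :=
    pv_ok_of_ok1 _ _ (fun lr hlr => by simpa using okall lr hlr)
  -- A's six passes
  rw [pv_passesA seq_with_gaps.toList (pvPosMap seq_with_gaps.toList).1
      (seq_with_gaps.toList.countP (fun c => c ≠ '-')) hpm pvPairs
      (PySem.List.enumerate css.toList 0) [] _ (by rw [List.length_replicate]) okall]
  -- B's single pass
  rw [pv_passB seq_with_gaps.toList (pvPosMap seq_with_gaps.toList).1
      (PySem.List.enumerate css.toList 0) (fun _ => []) pvStacks0 _ pvDinv0 hok]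
  -- each of A's passes is the filtered event list of B's single pass
  rw [List.flatMap_congr (g := fun lr =>
      (pvRun (fun _ => []) (PySem.List.enumerate css.toList 0)).filter
        (fun e => e.1 = lr.1))
      (fun lr hlr => pv_run1_filter (by simpa using hlr)
        (PySem.List.enumerate css.toList 0) (fun _ => []) hok)]
  -- permutation + commutation
  have hbag : pvBag (fun _ => []) = ([] : List Int) := rfl
  have hinv := pv_run_inv (PySem.List.enumerate css.toList 0) (fun _ => [])
    (by rw [hbag]; exact List.nodup_nil)
    (by rw [hbag]; intro x hx; cases hx)
    (PySem.List.pairwise_lt_enumerate _ _)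
  have hperm := pv_partition_perm (pvRun (fun _ => []) (PySem.List.enumerate css.toList 0))
    pvPairs (by decide)
    (fun e he => by
      have hfst := pv_run_fst (PySem.List.enumerate css.toList 0) (fun _ => []) e he
      have hmap : pvPairs.map (·.1) = pvLefts := by decide
      rw [hmap]
      simpa [pvIsLeft] using hfst)
  have hpair := pv_nodup_pairwise hinv.1
  have hforall := hpair.forall (by
    intro a b hab
    exact ⟨hab.1.symm, hab.2.2.1.symm, hab.2.1.symm, hab.2.2.2.symm⟩)
  refine List.Perm.foldl_eq' hperm ?_ _
  intro x hx y hy z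
  by_cases hxy : x = y
  · rw [hxy]
  · have hxE : x ∈ pvRun (fun _ => []) (PySem.List.enumerate css.toList 0) := by
      rcases List.mem_flatMap.1 hx with ⟨lr, _, hxf⟩
      exact (List.mem_filter.1 hxf).1
    have hyE : y ∈ pvRun (fun _ => []) (PySem.List.enumerate css.toList 0) := by
      rcases List.mem_flatMap.1 hy with ⟨lr, _, hyf⟩
      exact (List.mem_filter.1 hyf).1
    exact pv_apply_comm seq_with_gaps.toList (pvPosMap seq_with_gaps.toList).1 hnn hinj
      x y (hforall hxE hyE hxy) z
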